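-- pv_equiv track=rewrite | github.com/igruiz91/Codewars-HackerRank-LeetCode-CoderBite-freeCodeCamp | Codewars/Python/7 kyu/II/Simple letter removal.py | solve
-- ===== SOURCE A (Python) =====
-- def solve(st, k):
--   if k == "": return st
--   resp =""
--   abc = "abcdefghijklmnopqrstuvwxyz"
--   for i in range(len(abc)):
--     for x in st:
--       if(x == abc[i]):
--         resp = st.replace(x,'',1)
--         st = resp
--         k-=1
--         if k==0: return resp
--   return resp
-- ===== SOURCE B (Python) =====
-- def solve(st, k):
--     # Count-based single pass: find the boundary letter, then filter the string once.
--     remaining = max(k, 0)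
--     boundary = 26   # drop every lowercase letter with index < boundary ...
--     r = 0           # ... plus the first r occurrences of the boundary letter
--     for i in range(26):
--         c = st.count(chr(97 + i))
--         if remaining < c:
--             boundary = i
--             r = remaining
--             break
--         remaining -= c
--     out = []
--     for ch in st:
--         o = ord(ch) - 97
--         if 0 <= o < boundary:
--             continue
--         if o == boundary and r > 0:
--             r -= 1
--             continue
--         out.append(ch)
--     return "".join(out)
-- ===== Notes on version B (the rewrite author's own statement) =====
-- stated objective: faster
-- what changed: A repeatedly rescans and rebuilds the string (for each letter a..z, one str.replace per removed occurrence, O(26*n^2)); B counts each letter once to locate the boundary letter and remaining count r, then builds the result in a single filtering pass, O(n).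
-- intended difference: On non-empty strings containing no lowercase letter, A returns '' (its accumulator resp is never assigned), while B returns the string unchanged, which is the intended value since there is no removable letter. — e.g. on solve("ABC", 1): A returns "", B returns "ABC"
-- outside the precondition, e.g. on solve('abc', 0): A returns '', B returns 'abc'; on solve('xy', -1): A returns '', B returns 'xy'
import Mathlib
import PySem

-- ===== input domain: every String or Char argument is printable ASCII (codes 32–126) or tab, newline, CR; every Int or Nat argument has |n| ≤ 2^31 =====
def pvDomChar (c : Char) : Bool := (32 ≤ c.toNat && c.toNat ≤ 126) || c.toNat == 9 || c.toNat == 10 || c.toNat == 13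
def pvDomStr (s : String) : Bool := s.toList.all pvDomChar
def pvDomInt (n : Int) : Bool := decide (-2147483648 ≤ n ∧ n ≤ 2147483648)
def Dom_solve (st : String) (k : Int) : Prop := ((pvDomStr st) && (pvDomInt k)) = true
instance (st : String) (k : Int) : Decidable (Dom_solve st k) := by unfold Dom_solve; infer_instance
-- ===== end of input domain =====

-- B replaces A's per-letter rescan-and-replace loop with one counting pass that finds the
-- boundary letter and a single filtering pass (objective: faster); Pre_ restricts to the natural
-- domain k >= 1, and D_ records that on non-empty strings without lowercase letters A returns ""
-- while B keeps the string unchanged (the intended value).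


-- ===== PORT A =====
-- st.replace(x, '', 1) for a single character x: removes the first occurrence of x (exact:
-- a 1-character pattern matches exactly at the equal characters, and count=1 removes the first one).
def pyReplace1 : List Char → Char → List Char
  | [], _ => []
  | y :: ys, c => if y == c then ys else y :: pyReplace1 ys c

-- inner 'for x in st' loop over the snapshot xs; the early 'return resp' is Sum.inl
def solveInner : List Char → Char → List Char → List Char → Int → (List Char ⊕ (List Char × List Char × Int))
  | [], _, resp, st, k => Sum.inr (resp, st, k)
  | x :: xs, c, resp, st, k =>
      if x == c then
        let resp' := pyReplace1 st c
        let k' := k - 1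
        if k' == 0 then Sum.inl resp'
        else solveInner xs c resp' resp' k'
      else solveInner xs c resp st k

-- outer 'for i in range(len(abc))' loop; at each letter the snapshot is the current st
def solveOuter : List Char → List Char → List Char → Int → List Char
  | [], resp, _, _ => resp
  | c :: cs, resp, st, k =>
      match solveInner st c resp st k with
      | Sum.inl r => r
      | Sum.inr (resp', st', k') => solveOuter cs resp' st' k'

def solve (st : String) (k : Int) : String :=
  -- 'if k == "": return st' — k is an int, and int == str is always False in Python: branch omitted
  String.ofList (solveOuter "abcdefghijklmnopqrstuvwxyz".toList [] st.toList k)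

-- ===== PORT B =====
-- boundary search ('for i in range(26)' with break); remaining = max(k,0) is k.toNat; the
-- else-branch subtraction 'remaining -= c' is exact in Nat because there remaining ≥ c
def altFind (s : List Char) (remaining : Nat) : List Nat → (Nat × Nat)
  | [] => (26, 0)
  | i :: is =>
      let c := s.count (Char.ofNat (97 + i))
      if remaining < c then (i, remaining) else altFind s (remaining - c) is

-- the single filtering pass; o = ord(ch) - 97 as a Python int
def altFilter : List Char → Nat → Nat → List Char
  | [], _, _ => []
  | ch :: t, b, r =>
      let o : Int := (ch.toNat : Int) - 97
      if 0 ≤ o ∧ o < (b : Int) then altFilter t b r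
      else if o = (b : Int) ∧ 0 < r then altFilter t b (r - 1)
      else ch :: altFilter t b r

def solve_alt (st : String) (k : Int) : String :=
  let s := st.toList
  let br := altFind s k.toNat (List.range 26)
  String.ofList (altFilter s br.1 br.2)

-- ===== PRECONDITION & SPEC =====
-- Pre_ restricts to the natural domain of the task (remove k ≥ 1 letters): for k ≤ 0 A strips
-- every lowercase letter (or returns "" when there is none) instead of removing nothing, an
-- accident of its never-reaching-zero countdown, while B returns st unchanged there; the empty
-- string stays inside Pre_ for every k, since there A and B both return "".
def Pre_solve (st : String) (k : Int) : Prop := 1 ≤ k ∨ st = ""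
instance (st : String) (k : Int) : Decidable (Pre_solve st k) := by unfold Pre_solve; infer_instance
def pvWitness_solve : String × Int := ("banana", 3)

-- On non-empty strings with no lowercase letter A returns "" (its accumulator resp is never
-- assigned) while B returns the string unchanged, the intended value since nothing is removable.
def D_solve (st : String) (k : Int) : Prop :=
  st ≠ "" ∧ ∀ c ∈ st.toList, ¬ (97 ≤ c.toNat ∧ c.toNat ≤ 122)
instance (st : String) (k : Int) : Decidable (D_solve st k) := by unfold D_solve; infer_instance

def Spec_solve (st : String) (k : Int) (out : String) : Prop := ¬ D_solve st k → out = solve_alt st k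
instance (st : String) (k : Int) (out : String) : Decidable (Spec_solve st k out) := by unfold Spec_solve; infer_instance

def pvDiffWitness_solve : String × Int := ("ABC", 1)
def pvDiffWitnessOut_solve : String × String := ("", "ABC")

-- ===== CLAIM (what is proved, stated in full; the proofs are below) =====
def Claim_unchanged_solve : Prop := ∀ (st : String) (k : Int), Dom_solve st k → Pre_solve st k → Spec_solve st k (solve st k)
def Claim_changed_solve : Prop := Dom_solve (pvDiffWitness_solve.1) (pvDiffWitness_solve.2) ∧ Pre_solve (pvDiffWitness_solve.1) (pvDiffWitness_solve.2) ∧ D_solve (pvDiffWitness_solve.1) (pvDiffWitness_solve.2) ∧ solve (pvDiffWitness_solve.1) (pvDiffWitness_solve.2) = pvDiffWitnessOut_solve.1 ∧ solve_alt (pvDiffWitness_solve.1) (pvDiffWitness_solve.2) = pvDiffWitnessOut_solve.2 ∧ pvDiffWitnessOut_solve.1 ≠ pvDiffWitnessOut_solve.2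
def Claim_exact_solve : Prop := ∀ (st : String) (k : Int), Dom_solve st k → Pre_solve st k → D_solve st k → solve st k ≠ solve_alt st k

-- ===== LEMMAS AND PROOFS =====

-- remove the first m occurrences of c (the effect of m successive st.replace(c,'',1))
def removeN (c : Char) : Nat → List Char → List Char
  | 0, s => s
  | m + 1, s => removeN c m (pyReplace1 s c)

-- A's algorithm, letter by letter, with the early return resolved: the common reference shape
def specA : List Char → List Char → List Char → Int → List Char
  | [], resp, _, _ => resp
  | c :: cs, resp, st, k =>
      if k ≤ (st.count c : Int) then removeN c k.toNat st
      else specA cs (if st.count c = 0 then resp else removeN c (st.count c) st)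
             (removeN c (st.count c) st) (k - st.count c)

theorem charTN (j : Nat) (h : j < 123) : (Char.ofNat j).toNat = j := by
  have hv : j.isValidChar := Or.inl (by omega)
  unfold Char.ofNat
  rw [dif_pos hv]
  simp [Char.ofNatAux, Char.toNat, UInt32.toNat_ofNatLT]

theorem char_eq_of_toNat (a b : Char) (h : a.toNat = b.toNat) : a = b := by
  have := congrArg Char.ofNat h
  rwa [Char.ofNat_toNat, Char.ofNat_toNat] at this

theorem pyReplace1_cons_self (c : Char) (t : List Char) : pyReplace1 (c :: t) c = t := by
  simp [pyReplace1]

theorem pyReplace1_cons_ne (x c : Char) (t : List Char) (h : x ≠ c) :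
    pyReplace1 (x :: t) c = x :: pyReplace1 t c := by
  simp [pyReplace1, h]

theorem count_pyReplace1_self (s : List Char) (c : Char) :
    (pyReplace1 s c).count c = s.count c - 1 := by
  induction s with
  | nil => simp [pyReplace1]
  | cons x t ih =>
    by_cases hx : x = c
    · subst hx; simp [pyReplace1_cons_self]
    · rw [pyReplace1_cons_ne x c t hx]
      simp [hx, ih]

theorem count_pyReplace1_ne (s : List Char) (c d : Char) (h : d ≠ c) :
    (pyReplace1 s c).count d = s.count d := by
  induction s with
  | nil => simp [pyReplace1]
  | cons x t ih =>
    by_cases hx : x = c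
    · subst hx; simp [pyReplace1_cons_self, Ne.symm h]
    · rw [pyReplace1_cons_ne x c t hx]; simp [List.count_cons, ih]

theorem removeN_nil (c : Char) (m : Nat) : removeN c m [] = [] := by
  induction m with
  | zero => rfl
  | succ m ih => simp [removeN, pyReplace1, ih]

theorem removeN_cons_self (c : Char) (m : Nat) (t : List Char) :
    removeN c (m + 1) (c :: t) = removeN c m t := by
  simp [removeN, pyReplace1_cons_self]

theorem removeN_cons_ne (x c : Char) (m : Nat) (t : List Char) (h : x ≠ c) :
    removeN c m (x :: t) = x :: removeN c m t := by
  induction m generalizing t with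
  | zero => rfl
  | succ m ih => rw [removeN, pyReplace1_cons_ne x c t h, ih, removeN]

theorem count_removeN_self (c : Char) (m : Nat) (s : List Char) :
    (removeN c m s).count c = s.count c - m := by
  induction m generalizing s with
  | zero => rfl
  | succ m ih => rw [removeN, ih, count_pyReplace1_self]; omega

theorem count_removeN_ne (c d : Char) (m : Nat) (s : List Char) (h : d ≠ c) :
    (removeN c m s).count d = s.count d := by
  induction m generalizing s with
  | zero => rfl
  | succ m ih => rw [removeN, ih, count_pyReplace1_ne s c d h]

theorem pyReplace1_sublist (s : List Char) (c : Char) : (pyReplace1 s c).Sublist s := by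
  induction s with
  | nil => simp [pyReplace1]
  | cons x t ih =>
    by_cases hx : x = c
    · subst hx; rw [pyReplace1_cons_self]; exact List.sublist_cons_self x t
    · rw [pyReplace1_cons_ne x c t hx]; exact ih.cons₂ x

theorem removeN_sublist (c : Char) (m : Nat) (s : List Char) : (removeN c m s).Sublist s := by
  induction m generalizing s with
  | zero => exact List.Sublist.refl s
  | succ m ih => exact (ih (pyReplace1 s c)).trans (pyReplace1_sublist s c)

theorem mem_removeN (c x : Char) (m : Nat) (s : List Char) (h : x ∈ removeN c m s) : x ∈ s :=
  (removeN_sublist c m s).subset h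

theorem removeN_count_eq_filter (c : Char) (s : List Char) :
    removeN c (s.count c) s = s.filter (fun x => !(x == c)) := by
  induction s with
  | nil => simp [removeN_nil]
  | cons x t ih =>
    by_cases hx : x = c
    · subst hx
      rw [show (x :: t).count x = t.count x + 1 by simp,
          removeN_cons_self, ih]
      simp
    · rw [show (x :: t).count c = t.count c by simp [hx],
          removeN_cons_ne x c _ t hx, ih]
      simp [hx]

-- ---------- the inner loop ----------

theorem solveInner_notmem (xs : List Char) (c : Char) (resp st : List Char) (k : Int)
    (h : c ∉ xs) : solveInner xs c resp st k = Sum.inr (resp, st, k) := by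
  induction xs with
  | nil => rfl
  | cons x t ih =>
    have hx : ¬(x = c) := fun he => h (he ▸ List.mem_cons_self)
    rw [solveInner]
    simp only [beq_iff_eq, hx, if_false]
    exact ih (fun hm => h (List.mem_cons_of_mem x hm))

theorem innerA (xs : List Char) (c : Char) (resp st : List Char) (k : Int)
    (hc : xs.count c ≤ st.count c) (hk1 : 1 ≤ k) (hkn : k ≤ (xs.count c : Int)) :
    solveInner xs c resp st k = Sum.inl (removeN c k.toNat st) := by
  induction xs generalizing resp st k with
  | nil => simp at hkn; omega
  | cons x t ih =>
    by_cases hx : x = c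
    · subst hx
      have hcnt : (x :: t).count x = t.count x + 1 := by simp
      rw [solveInner]
      simp only [BEq.rfl, if_true]
      by_cases hk : k = 1
      · subst hk
        norm_num
        rfl
      · have hk2 : 2 ≤ k := by omega
        have : (k - 1 == 0) = false := by simp; omega
        rw [this]
        simp only [Bool.false_eq_true, if_false]
        have hcc : t.count x ≤ (pyReplace1 st x).count x := by
          rw [count_pyReplace1_self]; omega
        rw [ih (pyReplace1 st x) (pyReplace1 st x) (k - 1) hcc (by omega) (by rw [hcnt] at hkn; push_cast at hkn ⊢; omega)]
        have hN : k.toNat = (k - 1).toNat + 1 := by omega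
        rw [hN, removeN]
    · have hcnt : (x :: t).count c = t.count c := by simp [hx]
      rw [solveInner]
      simp only [beq_iff_eq, hx, if_false]
      exact ih resp st k (by omega) hk1 (by rwa [hcnt] at hkn)

theorem innerB (xs : List Char) (c : Char) (resp st : List Char) (k : Int)
    (hc : xs.count c ≤ st.count c) (hk1 : 1 ≤ k) (hkn : (xs.count c : Int) < k) :
    solveInner xs c resp st k =
      Sum.inr ((if xs.count c = 0 then resp else removeN c (xs.count c) st),
        removeN c (xs.count c) st, k - xs.count c) := by
  induction xs generalizing resp st k with
  | nil => simp [solveInner, removeN]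
  | cons x t ih =>
    by_cases hx : x = c
    · subst hx
      have hcnt : (x :: t).count x = t.count x + 1 := by simp
      rw [hcnt] at hkn ⊢
      push_cast at hkn
      rw [solveInner]
      simp only [BEq.rfl, if_true]
      have : (k - 1 == 0) = false := by simp; omega
      rw [this]
      simp only [Bool.false_eq_true, if_false]
      have hcc : t.count x ≤ (pyReplace1 st x).count x := by
        rw [count_pyReplace1_self]; omega
      rw [ih (pyReplace1 st x) (pyReplace1 st x) (k - 1) hcc (by omega) (by omega)]
      have h1 : removeN x (t.count x + 1) st = removeN x (t.count x) (pyReplace1 st x) := rfl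
      simp only [Sum.inr.injEq, Prod.mk.injEq]
      refine ⟨?_, h1.symm, by push_cast; ring⟩
      by_cases h0 : t.count x = 0
      · rw [if_pos h0, if_neg (by omega : ¬(t.count x + 1 = 0)), h1, h0]
        rfl
      · rw [if_neg h0, if_neg (by omega : ¬(t.count x + 1 = 0)), h1]
    · have hcnt : (x :: t).count c = t.count c := by simp [hx]
      rw [hcnt] at hkn ⊢
      rw [solveInner]
      simp only [beq_iff_eq, hx, if_false]
      exact ih resp st k (by omega) hk1 hkn

-- ---------- the outer loop equals specA ----------

theorem outer_eq_specA (cs : List Char) (resp st : List Char) (k : Int) (hk : 1 ≤ k) :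
    solveOuter cs resp st k = specA cs resp st k := by
  induction cs generalizing resp st k with
  | nil => rfl
  | cons c cs ih =>
    rw [solveOuter, specA]
    by_cases h1 : k ≤ (st.count c : Int)
    · rw [innerA st c resp st k le_rfl hk h1, if_pos h1]
    · rw [innerB st c resp st k le_rfl hk (by omega), if_neg h1]
      exact ih _ _ _ (by omega)

-- ---------- B-side shape lemmas ----------

theorem altFilter_zero_eq_filter (s : List Char) (b : Nat) (hb : b ≤ 26) :
    altFilter s b 0 = s.filter (fun c => !(decide (97 ≤ c.toNat) && decide (c.toNat < 97 + b))) := by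
  induction s with
  | nil => rfl
  | cons ch t ih =>
    rw [altFilter]
    by_cases hA : 97 ≤ ch.toNat
    · by_cases hB : ch.toNat < 97 + b
      · rw [if_pos ⟨by omega, by omega⟩, ih]
        simp only [List.filter_cons]
        rw [if_neg (by simp; omega)]
      · rw [if_neg (by rintro ⟨h1, h2⟩; omega), if_neg (by rintro ⟨h1, h2⟩; omega), ih]
        simp only [List.filter_cons]
        rw [if_pos (by simp; omega)]
    · rw [if_neg (by rintro ⟨h1, h2⟩; omega), if_neg (by rintro ⟨h1, h2⟩; omega), ih]
      simp only [List.filter_cons]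
      rw [if_pos (by simp; omega)]

theorem altFilter_eq_removeN (s : List Char) (r b : Nat) (hb : b < 26)
    (hlow : ∀ c ∈ s, 97 ≤ c.toNat → c.toNat ≤ 122 → 97 + b ≤ c.toNat) :
    altFilter s b r = removeN (Char.ofNat (97 + b)) r s := by
  induction s generalizing r with
  | nil => rw [removeN_nil]; rfl
  | cons ch t ih =>
    have hlow' : ∀ c ∈ t, 97 ≤ c.toNat → c.toNat ≤ 122 → 97 + b ≤ c.toNat :=
      fun c hc => hlow c (List.mem_cons_of_mem ch hc)
    have hLb : (Char.ofNat (97 + b)).toNat = 97 + b := charTN _ (by omega)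
    rw [altFilter]
    have h1 : ¬(0 ≤ (ch.toNat : Int) - 97 ∧ (ch.toNat : Int) - 97 < (b : Int)) := by
      intro ⟨ha, hc⟩
      have := hlow ch List.mem_cons_self (by omega) (by omega)
      omega
    rw [if_neg h1]
    by_cases h2 : (ch.toNat : Int) - 97 = (b : Int)
    · have hch : ch = Char.ofNat (97 + b) := by
        apply char_eq_of_toNat; rw [hLb]; omega
      by_cases hr : 0 < r
      · rw [if_pos ⟨h2, hr⟩]
        obtain ⟨r', rfl⟩ : ∃ r', r = r' + 1 := ⟨r - 1, by omega⟩
        rw [hch, removeN_cons_self]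
        simpa using ih r' hlow'
      · rw [if_neg (by simp [hr])]
        have hr0 : r = 0 := by omega
        subst hr0
        rw [show removeN (Char.ofNat (97 + b)) 0 (ch :: t) = ch :: t from rfl]
        rw [ih 0 hlow', show removeN (Char.ofNat (97 + b)) 0 t = t from rfl]
    · rw [if_neg (by simp [h2])]
      have hne : ch ≠ Char.ofNat (97 + b) := by
        intro he; apply h2; rw [he, hLb]; push_cast; ring
      rw [removeN_cons_ne ch _ r t hne, ih r hlow']

theorem altFind_zero_filter (m j : Nat) (s : List Char) (hjm : j + m = 26) :
    altFilter s (altFind s 0 (List.range' j m)).1 (altFind s 0 (List.range' j m)).2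
      = s.filter (fun c => !(decide (97 ≤ c.toNat) && decide (c.toNat < 97 + j))) := by
  induction m generalizing j with
  | zero =>
    have : j = 26 := by omega
    subst this
    exact altFilter_zero_eq_filter s 26 le_rfl
  | succ m ih =>
    rw [List.range'_succ, altFind]
    by_cases h : (0 : Nat) < s.count (Char.ofNat (97 + j))
    · rw [if_pos h]
      exact altFilter_zero_eq_filter s j (by omega)
    · rw [if_neg h]
      have h0 : s.count (Char.ofNat (97 + j)) = 0 := by omega
      rw [show 0 - s.count (Char.ofNat (97 + j)) = 0 from by omega]
      rw [ih (j + 1) (by omega)]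
      apply List.filter_congr
      intro c hc
      have hne : c ≠ Char.ofNat (97 + j) := by
        intro he; subst he; exact (List.count_eq_zero.mp h0) hc
      have hxT : c.toNat ≠ 97 + j := by
        intro he
        exact hne (char_eq_of_toNat _ _ (by rw [charTN (97 + j) (by omega)]; exact he))
      have hdd : decide (c.toNat < 97 + (j + 1)) = decide (c.toNat < 97 + j) :=
        decide_eq_decide.mpr (by constructor <;> intro <;> omega)
      rw [hdd]

theorem altFilter_removeN_dropped (s : List Char) (m : Nat) (c : Char) (b r : Nat)
    (h97 : 97 ≤ c.toNat) (hcb : c.toNat < 97 + b) :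
    altFilter (removeN c m s) b r = altFilter s b r := by
  induction s generalizing m r with
  | nil => rw [removeN_nil]
  | cons x t ih =>
    by_cases hx : x = c
    · subst hx
      cases m with
      | zero => rfl
      | succ m =>
        rw [removeN_cons_self, ih m r]
        rw [altFilter, if_pos (by constructor <;> [omega; omega])]
    · rw [removeN_cons_ne x c m t hx]
      rw [altFilter, altFilter]
      by_cases h1 : 0 ≤ (x.toNat : Int) - 97 ∧ (x.toNat : Int) - 97 < (b : Int)
      · rw [if_pos h1, if_pos h1, ih m r]
      · rw [if_neg h1, if_neg h1]
        by_cases h2 : (x.toNat : Int) - 97 = (b : Int) ∧ 0 < r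
        · rw [if_pos h2, if_pos h2, ih m (r - 1)]
        · rw [if_neg h2, if_neg h2, ih m r]

theorem altFind_congr (is : List Nat) (r : Nat) (s1 s2 : List Char)
    (h : ∀ j ∈ is, s1.count (Char.ofNat (97 + j)) = s2.count (Char.ofNat (97 + j))) :
    altFind s1 r is = altFind s2 r is := by
  induction is generalizing r with
  | nil => rfl
  | cons j is ih =>
    rw [altFind, altFind, h j List.mem_cons_self]
    by_cases hc : r < s2.count (Char.ofNat (97 + j))
    · rw [if_pos hc, if_pos hc]
    · rw [if_neg hc, if_neg hc]
      exact ih _ (fun j' hj' => h j' (List.mem_cons_of_mem j hj'))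

theorem altFind_fst (is : List Nat) (s : List Char) (r : Nat) :
    (altFind s r is).1 ∈ is ∨ altFind s r is = (26, 0) := by
  induction is generalizing r with
  | nil => right; rfl
  | cons j is ih =>
    rw [altFind]
    by_cases hc : r < s.count (Char.ofNat (97 + j))
    · rw [if_pos hc]; left; exact List.mem_cons_self
    · rw [if_neg hc]
      rcases ih (r - s.count (Char.ofNat (97 + j))) with h | h
      · left; exact List.mem_cons_of_mem j h
      · right; exact h

-- ---------- the main equivalence of specA and B's two passes ----------

theorem mainEq (n : Nat) : ∀ (i : Nat) (st resp : List Char) (k : Int), i + n = 26 → 1 ≤ k →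
    (∀ c ∈ st, 97 ≤ c.toNat → c.toNat ≤ 122 → 97 + i ≤ c.toNat) →
    (resp = st ∨ ∃ c ∈ st, 97 ≤ c.toNat ∧ c.toNat ≤ 122) →
    specA ((List.range' i n).map (fun j => Char.ofNat (97 + j))) resp st k
      = altFilter st (altFind st k.toNat (List.range' i n)).1 (altFind st k.toNat (List.range' i n)).2 := by
  induction n with
  | zero =>
    intro i st resp k hi hk hlow hinv
    have hi26 : i = 26 := by omega
    subst hi26
    have hresp : resp = st := by
      rcases hinv with h | ⟨c, hc, hc1, hc2⟩
      · exact h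
      · exact absurd (hlow c hc hc1 hc2) (by omega)
    rw [hresp]
    rw [show specA ((List.range' 26 0).map (fun j => Char.ofNat (97 + j))) st st k = st from rfl]
    rw [show altFind st k.toNat (List.range' 26 0) = (26, 0) from rfl]
    rw [altFilter_zero_eq_filter st 26 le_rfl]
    refine (List.filter_eq_self.mpr ?_).symm
    intro c hc
    simp only [Bool.not_eq_eq_eq_not, Bool.not_true, Bool.and_eq_false_iff]
    by_cases h97 : 97 ≤ c.toNat
    · by_cases h122 : c.toNat ≤ 122
      · exact absurd (hlow c hc h97 h122) (by omega)
      · right; simp; omega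
    · left; simp; omega
  | succ n ih =>
    intro i st resp k hi hk hlow hinv
    have hi25 : i < 26 := by omega
    set c := Char.ofNat (97 + i) with hcdef
    have hcTN : c.toNat = 97 + i := charTN _ (by omega)
    set cnt := st.count c with hcntdef
    rw [List.range'_succ, List.map_cons, specA, altFind]
    simp only [← hcdef, ← hcntdef]
    by_cases h2 : k.toNat < cnt
    · have h1 : k ≤ (cnt : Int) := by omega
      rw [if_pos h1, if_pos h2]
      exact (altFilter_eq_removeN st k.toNat i hi25 hlow).symm
    · rw [if_neg h2]
      by_cases h1 : k ≤ (cnt : Int)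
      · -- k = cnt: A removes every occurrence of letter i; B's boundary moves past i with r = 0
        have hkc : k.toNat = cnt := by omega
        rw [if_pos h1, hkc, Nat.sub_self]
        rw [altFind_zero_filter n (i + 1) st (by omega)]
        rw [hcntdef, removeN_count_eq_filter]
        apply List.filter_congr
        intro x hx
        by_cases hxc : x = c
        · rw [show (x == c) = true from by simp [hxc]]
          rw [show decide (97 ≤ x.toNat) = true from by
            simp only [hxc, hcTN, decide_eq_true_eq]; omega]
          rw [show decide (x.toNat < 97 + (i + 1)) = true from by
            simp only [hxc, hcTN, decide_eq_true_eq]; omega]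
          rfl
        · have hxT : x.toNat ≠ 97 + i := by
            intro he
            exact hxc (char_eq_of_toNat _ _ (by rw [hcTN]; exact he))
          rw [show (x == c) = false from by simp [hxc]]
          have hff : (decide (97 ≤ x.toNat) && decide (x.toNat < 97 + (i + 1))) = false := by
            by_cases hA : 97 ≤ x.toNat
            · by_cases hB : x.toNat < 97 + (i + 1)
              · exfalso
                have h1 := hlow x hx hA (by omega)
                omega
              · simp [hB]
            · simp [hA]
          rw [hff]
      · -- cnt < k: recurse with the letter fully removed
        rw [if_neg h1]
        have hck : (cnt : Int) < k := by omega
        set R := removeN c cnt st with hRdef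
        have hcR : R.count c = 0 := by rw [hRdef, count_removeN_self]; omega
        have hmemR : ∀ x ∈ R, x ∈ st := fun x hx => mem_removeN c x cnt st hx
        have hlow' : ∀ x ∈ R, 97 ≤ x.toNat → x.toNat ≤ 122 → 97 + (i + 1) ≤ x.toNat := by
          intro x hx h97 h122
          have hge := hlow x (hmemR x hx) h97 h122
          have hne : x ≠ c := by
            intro he; subst he
            exact (List.count_eq_zero.mp hcR) hx
          have : x.toNat ≠ 97 + i := by
            intro he
            exact hne (char_eq_of_toNat _ _ (by rw [hcTN]; exact he))
          omega
        have hinv' : (if cnt = 0 then resp else R) = R ∨ ∃ x ∈ R, 97 ≤ x.toNat ∧ x.toNat ≤ 122 := by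
          by_cases h0 : cnt = 0
          · have hR : R = st := by rw [hRdef, h0]; rfl
            rcases hinv with h | h
            · left; rw [if_pos h0, hR, h]
            · right; rw [hR]; exact h
          · left; rw [if_neg h0]
        rw [ih (i + 1) R (if cnt = 0 then resp else R) (k - cnt) (by omega) (by omega) hlow' hinv']
        have hfind : altFind R ((k - cnt).toNat) (List.range' (i + 1) n)
            = altFind st (k.toNat - cnt) (List.range' (i + 1) n) := by
          rw [show (k - (cnt : Int)).toNat = k.toNat - cnt from by omega]
          apply altFind_congr
          intro j hj
          have hji : i + 1 ≤ j ∧ j < i + 1 + n := List.mem_range'_1.mp hj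
          have hne : Char.ofNat (97 + j) ≠ c := by
            intro he
            have := congrArg Char.toNat he
            rw [hcTN, charTN (97 + j) (by omega)] at this
            omega
          rw [hRdef, count_removeN_ne c _ cnt st hne]
        rw [hfind]
        set b := (altFind st (k.toNat - cnt) (List.range' (i + 1) n)).1 with hbdef
        have hib : i < b := by
          rcases altFind_fst (List.range' (i + 1) n) st (k.toNat - cnt) with h | h
          · have := List.mem_range'_1.mp (hbdef ▸ h)
            omega
          · rw [hbdef, h]; omega
        exact altFilter_removeN_dropped st cnt c b _ (by omega) (by omega)

-- ---------- D_-region facts ----------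

theorem outer_nolower (cs : List Char) (hcs : ∀ c ∈ cs, 97 ≤ c.toNat ∧ c.toNat ≤ 122)
    (resp s : List Char) (k : Int) (hs : ∀ x ∈ s, ¬(97 ≤ x.toNat ∧ x.toNat ≤ 122)) :
    solveOuter cs resp s k = resp := by
  induction cs with
  | nil => rfl
  | cons c cs ih =>
    have hns : c ∉ s := fun hm => hs c hm (hcs c List.mem_cons_self)
    rw [solveOuter, solveInner_notmem s c resp s k hns]
    exact ih (fun c' hc' => hcs c' (List.mem_cons_of_mem c hc'))

theorem altFilter_nolower (s : List Char) (hs : ∀ x ∈ s, ¬(97 ≤ x.toNat ∧ x.toNat ≤ 122))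
    (b r : Nat) (hb : b ≤ 26) (hbr : b = 26 → r = 0) :
    altFilter s b r = s := by
  induction s generalizing r with
  | nil => rfl
  | cons x t ih =>
    have hx := hs x List.mem_cons_self
    rw [altFilter]
    rw [if_neg (by intro ⟨ha, hc⟩; exact hx ⟨by omega, by omega⟩)]
    rw [if_neg (by
      intro ⟨he, hr⟩
      by_cases h26 : b = 26
      · subst h26; exact absurd (hbr rfl) (by omega)
      · exact hx ⟨by omega, by omega⟩)]
    rw [ih (fun x' hx' => hs x' (List.mem_cons_of_mem x hx')) r hbr]

-- ---------- assembly ----------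

set_option maxRecDepth 8192 in
theorem letters_eq : "abcdefghijklmnopqrstuvwxyz".toList
    = (List.range' 0 26).map (fun j => Char.ofNat (97 + j)) := by decide

theorem letters_low : ∀ c ∈ (List.range' 0 26).map (fun j => Char.ofNat (97 + j)),
    97 ≤ c.toNat ∧ c.toNat ≤ 122 := by
  intro c hc
  obtain ⟨j, hj, rfl⟩ := List.mem_map.mp hc
  have hjr := List.mem_range'_1.mp hj
  rw [charTN _ (by omega)]
  omega

theorem solve_eq_of_not_D (st : String) (k : Int) (hk : 1 ≤ k) (hnd : ¬ D_solve st k) :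
    solve st k = solve_alt st k := by
  unfold solve solve_alt
  simp only []
  rw [letters_eq, List.range_eq_range', outer_eq_specA _ _ _ _ hk]
  congr 1
  apply mainEq 26 0 st.toList [] k rfl hk
  · intro x _ h97 _; omega
  · by_cases hst : st = ""
    · left; rw [hst]; rfl
    · right
      unfold D_solve at hnd
      push Not at hnd
      obtain ⟨x, hx, hlx⟩ := hnd hst
      exact ⟨x, hx, hlx⟩

-- ===== VERDICT (by name: the statement is the Claim_ definition above) =====
theorem solve_spec : Claim_unchanged_solve := by
  intro st k _ hpre hnd
  rcases hpre with hk | hst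
  · exact solve_eq_of_not_D st k hk hnd
  · subst hst
    have h0 : ("" : String).toList = [] := by decide
    have hA : solve "" k = "" := by
      unfold solve
      rw [h0, letters_eq, outer_nolower _ letters_low [] [] k (by intro x hx; simp at hx)]
    have hB : solve_alt "" k = "" := by
      unfold solve_alt
      simp only [h0]
      rfl
    rw [hA, hB]

set_option maxRecDepth 8192 in
theorem witness_toList : ("ABC" : String).toList = ['A', 'B', 'C'] := by decide

theorem witness_nolower : ∀ c ∈ ("ABC" : String).toList, ¬ (97 ≤ c.toNat ∧ c.toNat ≤ 122) := by
  rw [witness_toList]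
  intro c hc
  have hA65 : ('A' : Char).toNat = 65 := by decide
  have hB66 : ('B' : Char).toNat = 66 := by decide
  have hC67 : ('C' : Char).toNat = 67 := by decide
  simp only [List.mem_cons, List.not_mem_nil, or_false] at hc
  rcases hc with rfl | rfl | rfl
  · rw [hA65]; omega
  · rw [hB66]; omega
  · rw [hC67]; omega

theorem witness_ne_empty : ("ABC" : String) ≠ "" := by
  intro h
  have := congrArg String.toList h
  rw [witness_toList, show ("" : String).toList = [] from by decide] at this
  exact absurd this (by simp)

theorem solve_changed : Claim_changed_solve := by
  unfold Claim_changed_solve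
  refine ⟨?_, ?_, ⟨witness_ne_empty, witness_nolower⟩, ?_, ?_, ?_⟩
  · show ((pvDomStr "ABC") && (pvDomInt 1)) = true
    have hA : pvDomChar 'A' = true := by decide
    have hB : pvDomChar 'B' = true := by decide
    have hC : pvDomChar 'C' = true := by decide
    unfold pvDomStr
    rw [witness_toList]
    simp [hA, hB, hC, pvDomInt]
  · show (1 : Int) ≤ 1 ∨ ("ABC" : String) = ""
    exact Or.inl (le_refl 1)
  · show solve "ABC" 1 = ""
    unfold solve
    rw [letters_eq, outer_nolower _ letters_low [] ("ABC" : String).toList 1 witness_nolower]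
  · show solve_alt "ABC" 1 = "ABC"
    unfold solve_alt
    simp only []
    have hfil : altFilter ("ABC" : String).toList
        (altFind ("ABC" : String).toList (1 : Int).toNat (List.range 26)).1
        (altFind ("ABC" : String).toList (1 : Int).toNat (List.range 26)).2
        = ("ABC" : String).toList := by
      rcases altFind_fst (List.range 26) ("ABC" : String).toList (1 : Int).toNat with h | h
      · exact altFilter_nolower _ witness_nolower _ _
          (le_of_lt (List.mem_range.mp h)) (fun h26 => absurd (h26 ▸ List.mem_range.mp h) (by omega))
      · rw [h]
        exact altFilter_nolower _ witness_nolower 26 0 le_rfl (fun _ => rfl)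
    rw [hfil]
    exact String.ofList_toList
  · show ("" : String) ≠ "ABC"
    exact fun h => witness_ne_empty h.symm

theorem solve_tight : Claim_exact_solve := by
  intro st k _ hpre hd
  obtain ⟨hne, hnl⟩ := hd
  have hs : ∀ x ∈ st.toList, ¬(97 ≤ x.toNat ∧ x.toNat ≤ 122) := hnl
  have hA : solve st k = "" := by
    unfold solve
    rw [letters_eq, outer_nolower _ letters_low [] st.toList k hs]
  have hB : solve_alt st k = st := by
    unfold solve_alt
    simp only []
    have hfil : altFilter st.toList (altFind st.toList k.toNat (List.range 26)).1
        (altFind st.toList k.toNat (List.range 26)).2 = st.toList := by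
      rcases altFind_fst (List.range 26) st.toList k.toNat with h | h
      · exact altFilter_nolower st.toList hs _ _
          (le_of_lt (List.mem_range.mp h)) (fun h26 => absurd (h26 ▸ List.mem_range.mp h) (by omega))
      · rw [h]
        exact altFilter_nolower st.toList hs 26 0 le_rfl (fun _ => rfl)
    rw [hfil]
    exact String.ofList_toList
  rw [hA, hB]
  exact fun h => hne h.symm
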